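-- pv_equiv track=rewrite | github.com/MaikZ91/ProductionToolsSoftwareSuite | data_management.py | find_guid_column_name
-- ===== SOURCE A (Python) =====
-- def find_guid_column_name(columns) -> str | None:
--     for col in columns:
--         norm = str(col).lower().replace("_", "").replace("-", "")
--         if "testguid" in norm:
--             return str(col)
--     for col in columns:
--         norm = str(col).lower().replace("_", "").replace("-", "")
--         if "guid" in norm and "test" in norm:
--             return str(col)
--     return None
-- ===== SOURCE B (Python) =====
-- def find_guid_column_name(columns) -> str | None:
--     # One backward pass keeping the leftmost candidate of each priority,
--     # combined at the end (strong 'testguid' match beats 'guid'+'test').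
--     strong = None
--     weak = None
--     for col in reversed(list(columns)):
--         norm = str(col).lower().replace("_", "").replace("-", "")
--         if "testguid" in norm:
--             strong = str(col)
--         elif "guid" in norm and "test" in norm:
--             weak = str(col)
--     return strong if strong is not None else weak
-- ===== Notes on version B (the rewrite author's own statement) =====
-- stated objective: alternative
-- what changed: Replaces A's two staged forward scans (early return on the first match of each priority) by a single backward pass that keeps the leftmost candidate of each priority in two accumulators and combines them at the end.
import Mathlib
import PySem

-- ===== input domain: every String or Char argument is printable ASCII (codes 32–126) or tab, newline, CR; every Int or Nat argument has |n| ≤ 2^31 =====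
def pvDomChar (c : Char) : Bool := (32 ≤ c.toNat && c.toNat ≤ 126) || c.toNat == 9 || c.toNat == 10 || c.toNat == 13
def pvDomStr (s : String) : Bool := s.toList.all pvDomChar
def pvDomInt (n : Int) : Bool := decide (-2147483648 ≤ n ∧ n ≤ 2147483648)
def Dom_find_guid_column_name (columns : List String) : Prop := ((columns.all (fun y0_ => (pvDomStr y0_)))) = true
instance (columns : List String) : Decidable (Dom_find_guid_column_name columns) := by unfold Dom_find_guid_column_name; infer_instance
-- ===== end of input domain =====

-- B replaces A's two staged forward scans by a single backward pass with two
-- priority accumulators, combined at the end (objective: alternative).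

-- ===== PORT A =====
-- norm = str(col).lower().replace("_", "").replace("-", "")
def pvNorm (col : String) : String :=
  PySem.Str.replace (PySem.Str.replace (PySem.Str.lower col) "_" "") "-" ""

-- first loop of A: return str(col) on "testguid" in norm
def pvLoop1 (columns : List String) : Option String :=
  match columns with
  | [] => none
  | col :: rest =>
      if PySem.Str.isIn "testguid" (pvNorm col) then some col else pvLoop1 rest

-- second loop of A: return str(col) on "guid" in norm and "test" in norm
def pvLoop2 (columns : List String) : Option String :=
  match columns with
  | [] => none
  | col :: rest =>
      if PySem.Str.isIn "guid" (pvNorm col) && PySem.Str.isIn "test" (pvNorm col) then some col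
      else pvLoop2 rest

def find_guid_column_name (columns : List String) : Option String :=
  match pvLoop1 columns with
  | some c => some c
  | none => pvLoop2 columns

-- ===== PORT B =====
-- Source B's backward pass: structural recursion visits the tail (= the earlier
-- reversed-loop iterations) first, then the head column overwrites the
-- accumulator of its priority — exactly `for col in reversed(list(columns))`.
def pvScan (columns : List String) : Option String × Option String :=
  match columns with
  | [] => (none, none)
  | col :: rest =>
      let (strong, weak) := pvScan rest
      if PySem.Str.isIn "testguid" (pvNorm col) then (some col, weak)
      else if PySem.Str.isIn "guid" (pvNorm col) && PySem.Str.isIn "test" (pvNorm col) then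
        (strong, some col)
      else (strong, weak)

def find_guid_column_name_alt (columns : List String) : Option String :=
  match pvScan columns with
  | (some s, _) => some s
  | (none, weak) => weak

-- ===== PRECONDITION & SPEC =====
def Spec_find_guid_column_name (columns : List String) (out : Option String) : Prop := out = find_guid_column_name_alt columns
instance (columns : List String) (out : Option String) : Decidable (Spec_find_guid_column_name columns out) := by unfold Spec_find_guid_column_name; infer_instance

-- ===== CLAIM (what is proved, stated in full; the proofs are below) =====
def Claim_equal_find_guid_column_name : Prop := ∀ (columns : List String), Dom_find_guid_column_name columns → Spec_find_guid_column_name columns (find_guid_column_name columns)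

-- ===== LEMMAS AND PROOFS =====
-- the strong accumulator is exactly A's first loop
theorem pvScan_fst (columns : List String) : (pvScan columns).1 = pvLoop1 columns := by
  induction columns with
  | nil => rfl
  | cons col rest ih =>
    simp only [pvScan, pvLoop1]
    split_ifs <;> simp [ih]

-- when no strong match exists, the weak accumulator is exactly A's second loop
theorem pvScan_snd (columns : List String) (h : (pvScan columns).1 = none) :
    (pvScan columns).2 = pvLoop2 columns := by
  induction columns with
  | nil => rfl
  | cons col rest ih =>
    simp only [pvScan, pvLoop2] at *
    split_ifs at * with h1 h2 <;> simp_all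

-- ===== VERDICT (by name: the statement is the Claim_ definition above) =====
theorem find_guid_column_name_spec : Claim_equal_find_guid_column_name := by
  intro columns _
  unfold Spec_find_guid_column_name find_guid_column_name find_guid_column_name_alt
  cases hs : pvScan columns with
  | mk strong weak =>
    cases strong with
    | some s =>
      have := pvScan_fst columns
      rw [hs] at this
      simp [← this]
    | none =>
      have h1 := pvScan_fst columns
      have h2 := pvScan_snd columns (by rw [hs])
      rw [hs] at h1 h2
      simp [← h1, ← h2]
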